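-- pv_equiv track=rewrite | github.com/BunchDevelopment/python-practice | basicFunctions.py | do_cube_things
-- ===== SOURCE A (Python) =====
-- def do_cube_things(num):
--     accum = 0
--     for ind in range(2) :
--         if(ind == 0):
--             accum += num * num
--         else :
--             accum = (accum * num)
--     result = str(num) + ' cubed is ' + str(accum)
--     return result
-- ===== SOURCE B (Python) =====
-- def do_cube_things(num):
--     def pow_by_squaring(base, exp):
--         if exp == 0:
--             return 1
--         half = pow_by_squaring(base, exp // 2)
--         sq = half * half
--         return sq * base if exp % 2 == 1 else sq
--     return '{} cubed is {}'.format(num, pow_by_squaring(num, 3))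
-- ===== Notes on version B (the rewrite author's own statement) =====
-- stated objective: alternative
-- what changed: Replaces A's fixed two-iteration accumulator loop with recursive exponentiation by squaring (pow_by_squaring(num, 3)) and builds the result with str.format instead of concatenation.
import Mathlib
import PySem

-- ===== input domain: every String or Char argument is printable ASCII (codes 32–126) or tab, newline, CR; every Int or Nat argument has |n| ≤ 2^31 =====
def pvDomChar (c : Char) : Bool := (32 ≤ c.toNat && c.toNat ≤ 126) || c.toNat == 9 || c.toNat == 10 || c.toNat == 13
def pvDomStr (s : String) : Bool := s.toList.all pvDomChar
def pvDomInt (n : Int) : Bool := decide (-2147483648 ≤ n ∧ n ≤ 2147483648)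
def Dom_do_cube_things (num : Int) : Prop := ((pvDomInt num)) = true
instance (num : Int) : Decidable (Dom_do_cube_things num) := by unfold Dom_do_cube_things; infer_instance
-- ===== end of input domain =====

-- B replaces A's two-iteration accumulation loop by recursive exponentiation-by-squaring and str.format-style assembly (alternative decomposition, same cost).


-- ===== PORT A =====
-- Port of A: fold over range(2) accumulating exactly as A's loop does.
def do_cube_things (num : Int) : String :=
  let accum : Int :=
    (PySem.List.pyRange 0 2 1).foldl
      (fun accum ind => if ind == 0 then accum + num * num else accum * num) 0
  PySem.Int.toStr num ++ " cubed is " ++ PySem.Int.toStr accum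

-- ===== PORT B =====
-- B's helper: recursive exponentiation by squaring (exp is a non-negative count, Nat).
def pvPowBySquaring (base : Int) (exp : Nat) : Int :=
  if exp = 0 then 1
  else
    let half := pvPowBySquaring base (exp / 2)
    let sq := half * half
    if exp % 2 = 1 then sq * base else sq
termination_by exp
decreasing_by exact Nat.div_lt_self (Nat.pos_of_ne_zero (by assumption)) (by norm_num)

-- B: '{} cubed is {}'.format(num, pow_by_squaring(num, 3)); format ported by hand
-- as substitution of the two arguments into the literal template (exact here: the
-- template has exactly the two auto-numbered fields and plain ASCII text).
def do_cube_things_alt (num : Int) : String :=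
  PySem.Int.toStr num ++ " cubed is " ++ PySem.Int.toStr (pvPowBySquaring num 3)

-- ===== PRECONDITION & SPEC =====
def Spec_do_cube_things (num : Int) (out : String) : Prop := out = do_cube_things_alt num
instance (num : Int) (out : String) : Decidable (Spec_do_cube_things num out) := by unfold Spec_do_cube_things; infer_instance

-- ===== CLAIM (what is proved, stated in full; the proofs are below) =====
def Claim_equal_do_cube_things : Prop := ∀ (num : Int), Dom_do_cube_things num → Spec_do_cube_things num (do_cube_things num)

-- ===== LEMMAS AND PROOFS =====
theorem pvPowBySquaring_three (num : Int) : pvPowBySquaring num 3 = num * num * num := by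
  unfold pvPowBySquaring
  unfold pvPowBySquaring
  unfold pvPowBySquaring
  norm_num

-- ===== VERDICT (by name: the statement is the Claim_ definition above) =====
theorem do_cube_things_spec : Claim_equal_do_cube_things := by
  intro num _
  unfold Spec_do_cube_things do_cube_things do_cube_things_alt
  simp [PySem.List.pyRange, List.range_succ, pvPowBySquaring_three]
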